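-- pv_equiv track=rewrite | github.com/BhallaLab/benchmarks | neuro_morpho/count_spike.py | spikeLocation
-- ===== SOURCE A (Python) =====
-- def spikeLocation(vec, threshold):
--     """Count the number of spikes in train, and return a list of index where
--     spike ends.
--     """
--
--     nSpikes = 0
--     spikeBegin, spikeEnds = False, False
--     spikeList = []
--     for i, x in enumerate(vec):
--         if x > threshold:
--             if not spikeBegin:
--                 spikeBegin, spikeEnds = True, False
--             else: pass
--         else:
--             if spikeBegin:
--                 spikeEnds, spikeBegin = True, False
--                 spikeList.append(i)
--                 nSpikes += 1
--     return nSpikes, spikeList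
-- ===== SOURCE B (Python) =====
-- def spikeLocation(vec, threshold):
--     """Count the number of spikes in train, and return a list of index where
--     spike ends.
--     """
--     spikeList = [i for i, (prev, cur) in enumerate(zip(vec, vec[1:]), 1)
--                  if prev > threshold and cur <= threshold]
--     return len(spikeList), spikeList
-- ===== Notes on version B (the rewrite author's own statement) =====
-- stated objective: simpler
-- what changed: Replaces A's stateful spikeBegin/spikeEnds flag machine with a stateless single comprehension over adjacent pairs: a spike ends at index i exactly when vec[i-1] > threshold and vec[i] <= threshold, and the count is just len(spikeList).
import Mathlib
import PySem

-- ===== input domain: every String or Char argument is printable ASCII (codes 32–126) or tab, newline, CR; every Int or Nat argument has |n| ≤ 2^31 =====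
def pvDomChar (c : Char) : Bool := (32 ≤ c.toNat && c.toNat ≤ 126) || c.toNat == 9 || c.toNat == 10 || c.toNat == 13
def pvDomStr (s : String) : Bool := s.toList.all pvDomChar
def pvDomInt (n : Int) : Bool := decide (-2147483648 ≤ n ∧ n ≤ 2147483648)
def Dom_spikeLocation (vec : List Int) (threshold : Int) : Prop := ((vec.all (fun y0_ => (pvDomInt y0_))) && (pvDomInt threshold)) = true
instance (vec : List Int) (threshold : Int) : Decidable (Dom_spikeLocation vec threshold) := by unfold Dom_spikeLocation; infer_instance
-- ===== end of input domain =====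

-- B replaces A's stateful spikeBegin/spikeEnds flag machine by a single stateless
-- comprehension over adjacent pairs (a spike ends where vec[i-1] > threshold ≥ vec[i]);
-- objective: simpler.

-- ===== PORT A =====
def spikeLocation (vec : List Int) (threshold : Int) : Int × List Int :=
  let st := (PySem.List.enumerate vec 0).foldl
    (fun (s : Int × Bool × Bool × List Int) (p : Int × Int) =>
      let (n, sb, se, lst) := s
      if p.2 > threshold then
        if !sb then (n, true, false, lst) else (n, sb, se, lst)
      else
        if sb then (n + 1, false, true, lst ++ [p.1]) else (n, sb, se, lst))
    (0, false, false, [])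
  (st.1, st.2.2.2)

-- ===== PORT B =====
def spikeLocation_alt (vec : List Int) (threshold : Int) : Int × List Int :=
  let spikeList := (PySem.List.enumerate (vec.zip (PySem.List.slice vec (some 1) none)) 1).filterMap
    (fun p => if p.2.1 > threshold ∧ p.2.2 ≤ threshold then some p.1 else none)
  ((spikeList.length : Int), spikeList)

-- ===== PRECONDITION & SPEC =====
def Spec_spikeLocation (vec : List Int) (threshold : Int) (out : Int × List Int) : Prop := out = spikeLocation_alt vec threshold
instance (vec : List Int) (threshold : Int) (out : Int × List Int) : Decidable (Spec_spikeLocation vec threshold out) := by unfold Spec_spikeLocation; infer_instance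

-- ===== CLAIM (what is proved, stated in full; the proofs are below) =====
def Claim_equal_spikeLocation : Prop := ∀ (vec : List Int) (threshold : Int), Dom_spikeLocation vec threshold → Spec_spikeLocation vec threshold (spikeLocation vec threshold)

-- ===== LEMMAS AND PROOFS =====

-- reference: falling edges of l starting at index i with "inside a spike" flag sb
def edgesA (t : Int) : List Int → Bool → Int → List Int
  | [], _, _ => []
  | x :: r, sb, i =>
      if x > t then edgesA t r true (i + 1)
      else (if sb then [i] else []) ++ edgesA t r false (i + 1)

-- reference matching B: pairwise scan with previous element prev, current index i
def edgesB (t prev i : Int) : List Int → List Int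
  | [] => []
  | c :: r => (if prev > t ∧ c ≤ t then [i] else []) ++ edgesB t c (i + 1) r

lemma edgesA_eq_edgesB (t : Int) (r : List Int) : ∀ (prev i : Int),
    edgesA t r (decide (prev > t)) i = edgesB t prev i r := by
  induction r with
  | nil => intro prev i; rfl
  | cons c r ih =>
      intro prev i
      simp only [edgesA, edgesB]
      by_cases hc : c > t
      · have : ¬ (prev > t ∧ c ≤ t) := by omega
        simp [hc, this, ← ih c (i + 1)]
      · have hle : c ≤ t := by omega
        by_cases hp : prev > t <;> simp [hc, hle, hp, ← ih c (i + 1)]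

lemma loopA (t : Int) (l : List Int) : ∀ (i n : Int) (sb se : Bool) (acc : List Int),
    ∃ sb' se',
      (PySem.List.enumerate l i).foldl
        (fun (s : Int × Bool × Bool × List Int) (p : Int × Int) =>
          let (n, sb, se, lst) := s
          if p.2 > t then
            if !sb then (n, true, false, lst) else (n, sb, se, lst)
          else
            if sb then (n + 1, false, true, lst ++ [p.1]) else (n, sb, se, lst))
        (n, sb, se, acc)
      = (n + ((edgesA t l sb i).length : Int), sb', se', acc ++ edgesA t l sb i) := by
  induction l with
  | nil => intro i n sb se acc; exact ⟨sb, se, by simp [PySem.List.enumerate, edgesA]⟩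
  | cons x r ih =>
      intro i n sb se acc
      rw [PySem.List.enumerate_cons, List.foldl_cons]
      by_cases hx : x > t
      · cases sb with
        | false =>
            obtain ⟨sb', se', h⟩ := ih (i + 1) n true false acc
            exact ⟨sb', se', by simpa [hx, edgesA] using h⟩
        | true =>
            obtain ⟨sb', se', h⟩ := ih (i + 1) n true se acc
            exact ⟨sb', se', by simpa [hx, edgesA] using h⟩
      · cases sb with
        | false =>
            obtain ⟨sb', se', h⟩ := ih (i + 1) n false se acc
            exact ⟨sb', se', by simpa [hx, edgesA] using h⟩
        | true =>
            obtain ⟨sb', se', h⟩ := ih (i + 1) (n + 1) false true (acc ++ [i])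
            refine ⟨sb', se', ?_⟩
            simp only [hx, edgesA, if_false, if_pos, List.length_append,
              List.length_cons, List.length_nil] at h ⊢
            simpa [hx, add_comm, add_left_comm, add_assoc] using h
  
lemma altB (t : Int) (r : List Int) : ∀ (prev i : Int),
    (PySem.List.enumerate ((prev :: r).zip r) i).filterMap
      (fun p => if p.2.1 > t ∧ p.2.2 ≤ t then some p.1 else none)
    = edgesB t prev i r := by
  induction r with
  | nil => intro prev i; rfl
  | cons c r ih =>
      intro prev i
      rw [List.zip_cons_cons, PySem.List.enumerate_cons, List.filterMap_cons]
      by_cases h : prev > t ∧ c ≤ t <;> simp [h, edgesB, ih c (i + 1)]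

-- ===== VERDICT (by name: the statement is the Claim_ definition above) =====
theorem spikeLocation_spec : Claim_equal_spikeLocation := by
  intro vec t _
  show spikeLocation vec t = spikeLocation_alt vec t
  cases vec with
  | nil => rfl
  | cons x r =>
      obtain ⟨sb', se', h⟩ := loopA t (x :: r) 0 0 false false []
      have hA : spikeLocation (x :: r) t
          = (((edgesA t (x :: r) false 0).length : Int), edgesA t (x :: r) false 0) := by
        simp only [spikeLocation, h]
        simp
      have hedge : edgesA t (x :: r) false 0 = edgesB t x 1 r := by
        simp only [edgesA, zero_add]
        by_cases hx : x > t
        · rw [if_pos hx, ← edgesA_eq_edgesB t r x 1, decide_eq_true hx]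
        · rw [if_neg hx, ← edgesA_eq_edgesB t r x 1, decide_eq_false hx]
          simp
      have hB : spikeLocation_alt (x :: r) t
          = (((edgesB t x 1 r).length : Int), edgesB t x 1 r) := by
        simp only [spikeLocation_alt, PySem.List.slice_from_one, List.tail_cons, altB]
      rw [hA, hB, hedge]
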